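-- pv_equiv track=rewrite | github.com/TianYuZu/AL_PL | mainweibiaoqian.py | margin_cosdis
-- ===== SOURCE A (Python) =====
-- def margin_cosdis(list):
--     Fmax=-100
--     Smax=-100
--     for item in list:
--         if(item>Fmax):
--             Smax = Fmax
--             Fmax=item
--         elif(Smax<item<=Fmax):
--             Smax = item
--     return Fmax-Smax
-- ===== SOURCE B (Python) =====
-- def margin_cosdis(list):
--     a, b = sorted([*list, -100, -100], reverse=True)[:2]
--     return a - b
-- ===== Notes on version B (the rewrite author's own statement) =====
-- stated objective: simpler
-- what changed: Replaces the incremental single-pass top-2 tracking with sorting the input plus the two -100 seed values descending and subtracting the second element from the first.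
import Mathlib
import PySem

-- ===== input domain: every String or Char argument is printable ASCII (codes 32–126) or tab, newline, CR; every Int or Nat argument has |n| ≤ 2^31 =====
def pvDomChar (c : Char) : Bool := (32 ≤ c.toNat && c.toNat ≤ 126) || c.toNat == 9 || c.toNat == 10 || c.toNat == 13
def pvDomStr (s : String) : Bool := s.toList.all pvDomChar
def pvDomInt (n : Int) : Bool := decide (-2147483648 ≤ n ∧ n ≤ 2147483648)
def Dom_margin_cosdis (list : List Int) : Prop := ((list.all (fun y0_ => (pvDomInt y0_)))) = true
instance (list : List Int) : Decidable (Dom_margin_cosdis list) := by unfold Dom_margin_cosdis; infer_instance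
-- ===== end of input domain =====

-- B replaces A's incremental top-2 tracking with sort-descending-then-subtract (objective: simpler).

-- ===== PORT A =====
-- one step of A's loop body, updating (Fmax, Smax)
def marginStep (p : Int × Int) (item : Int) : Int × Int :=
  if item > p.1 then (item, p.1)
  else if p.2 < item ∧ item ≤ p.1 then (p.1, item)
  else p

def margin_cosdis (list : List Int) : Int :=
  let r := list.foldl marginStep ((-100 : Int), (-100 : Int))
  r.1 - r.2

-- ===== PORT B =====
def margin_cosdis_alt (list : List Int) : Int :=
  match PySem.List.sorted (list ++ [(-100 : Int), (-100 : Int)]) (fun x => x) true with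
  | a :: b :: _ => a - b
  | _ => 0   -- unreachable: the sorted list has length ≥ 2

-- ===== PRECONDITION & SPEC =====
def Spec_margin_cosdis (list : List Int) (out : Int) : Prop := out = margin_cosdis_alt list
instance (list : List Int) (out : Int) : Decidable (Spec_margin_cosdis list out) := by unfold Spec_margin_cosdis; infer_instance

-- ===== CLAIM (what is proved, stated in full; the proofs are below) =====
def Claim_equal_margin_cosdis : Prop := ∀ (list : List Int), Dom_margin_cosdis list → Spec_margin_cosdis list (margin_cosdis list)

-- ===== LEMMAS AND PROOFS =====

-- the descending sort of any list is the unique ≥-sorted rearrangement of it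
theorem sortedRev_eq_of (xs ys : List Int) (h : ys.Perm xs)
    (hp : ys.Pairwise (fun a b => b ≤ a)) :
    PySem.List.sorted xs (fun x => x) true = ys := by
  refine List.Perm.eq_of_pairwise (fun a b _ _ h1 h2 => le_antisymm h2 h1)
    (by simpa using PySem.List.sorted_pairwise_rev xs (fun x => x)) hp
    ((PySem.List.sorted_perm xs (fun x => x) true).trans h.symm)

-- x :: (xs ++ [p, q]) is a rearrangement of (xs ++ [u, v]) ++ [w] whenever [x,p,q] ~ [u,v,w]
theorem perm_push (x p q u v w : Int) (xs : List Int) (h3 : [x, p, q].Perm [u, v, w]) :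
    (x :: (xs ++ [p, q])).Perm ((xs ++ [u, v]) ++ [w]) := by
  have e1 : (x :: (xs ++ [p, q])).Perm (xs ++ [x, p, q]) := by
    simpa using (List.perm_middle (a := x) (l₁ := xs) (l₂ := [p, q])).symm
  have e2 : (xs ++ [x, p, q]).Perm (xs ++ [u, v, w]) := List.Perm.append_left xs h3
  have e3 : (xs ++ [u, v]) ++ [w] = xs ++ [u, v, w] := by simp
  rw [e3]
  exact e1.trans e2

-- one case of the induction step: after extending the permutation with the dropped value
theorem perm_extend (a b x p q u v w : Int) (xs t : List Int)
    (hp : (xs ++ [u, v]).Perm (a :: b :: t)) (h3 : [x, p, q].Perm [u, v, w]) :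
    (x :: (xs ++ [p, q])).Perm (a :: b :: (t ++ [w])) := by
  have h2 : ((xs ++ [u, v]) ++ [w]).Perm (a :: b :: (t ++ [w])) := by
    have := hp.append_right [w]
    simpa using this
  exact (perm_push x p q u v w xs h3).trans h2

-- invariant of A's loop: (Fmax, Smax) are the two largest of the processed
-- elements together with the seeds, and the rest (t) lies below Smax
theorem marginLoop_top2 (xs : List Int) : ∀ (F S : Int), S ≤ F →
    S ≤ (xs.foldl marginStep (F, S)).2 ∧
    (xs.foldl marginStep (F, S)).2 ≤ (xs.foldl marginStep (F, S)).1 ∧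
    ∃ t : List Int,
      (xs ++ [S, F]).Perm ((xs.foldl marginStep (F, S)).1 :: (xs.foldl marginStep (F, S)).2 :: t) ∧
      ∀ y ∈ t, y ≤ (xs.foldl marginStep (F, S)).2 := by
  induction xs with
  | nil =>
    intro F S hSF
    refine ⟨le_refl _, hSF, [], ?_, by simp⟩
    simpa using List.Perm.swap F S []
  | cons x xs ih =>
    intro F S hSF
    by_cases h1 : x > F
    · have hstep : marginStep (F, S) x = (x, F) := by simp [marginStep, h1]
      obtain ⟨hS', hle, t, hp, ht⟩ := ih x F (le_of_lt h1)
      simp only [List.foldl_cons, hstep]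
      refine ⟨le_trans hSF hS', hle, t ++ [S], ?_, ?_⟩
      · exact perm_extend _ _ x S F F x S xs t hp
          ((List.Perm.cons x (List.Perm.swap F S [])).trans (List.Perm.swap F x [S]))
      · intro y hy
        rcases List.mem_append.mp hy with hy | hy
        · exact ht y hy
        · simp at hy; subst hy; exact le_trans hSF hS'
    · by_cases h2 : S < x ∧ x ≤ F
      · have hstep : marginStep (F, S) x = (F, x) := by simp [marginStep, h1, h2]
        obtain ⟨hS', hle, t, hp, ht⟩ := ih F x h2.2
        simp only [List.foldl_cons, hstep]
        refine ⟨le_trans (le_of_lt h2.1) hS', hle, t ++ [S], ?_, ?_⟩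
        · exact perm_extend _ _ x S F x F S xs t hp (List.Perm.cons x (List.Perm.swap F S []))
        · intro y hy
          rcases List.mem_append.mp hy with hy | hy
          · exact ht y hy
          · simp at hy; subst hy; exact le_trans (le_of_lt h2.1) hS'
      · have hstep : marginStep (F, S) x = (F, S) := by simp [marginStep, h1, h2]
        obtain ⟨hS', hle, t, hp, ht⟩ := ih F S hSF
        have hxS : x ≤ S := by
          rcases not_and_or.mp h2 with h | h
          · exact le_of_not_gt h
          · exact absurd (le_of_not_gt h1) h
        simp only [List.foldl_cons, hstep]
        refine ⟨hS', hle, t ++ [x], ?_, ?_⟩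
        · exact perm_extend _ _ x S F S F x xs t hp
            ((List.Perm.swap S x [F]).trans (List.Perm.cons S (List.Perm.swap F x [])))
        · intro y hy
          rcases List.mem_append.mp hy with hy | hy
          · exact ht y hy
          · simp at hy; subst hy; exact le_trans hxS hS'

-- ===== VERDICT (by name: the statement is the Claim_ definition above) =====
theorem margin_cosdis_spec : Claim_equal_margin_cosdis := by
  intro list _
  unfold Spec_margin_cosdis margin_cosdis margin_cosdis_alt
  obtain ⟨hS, hle, t, hp, ht⟩ := marginLoop_top2 list (-100) (-100) (le_refl _)
  set r := list.foldl marginStep (-100, -100) with hr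
  have hsorted : PySem.List.sorted (list ++ [(-100 : Int), (-100 : Int)]) (fun x => x) true
      = r.1 :: r.2 :: PySem.List.sorted t (fun x => x) true := by
    apply sortedRev_eq_of
    · exact (List.Perm.cons _ (List.Perm.cons _ (PySem.List.sorted_perm t (fun x => x) true))).trans hp.symm
    · constructor
      · intro b hb
        rcases List.mem_cons.mp hb with hb | hb
        · subst hb; exact hle
        · exact le_trans (ht b ((PySem.List.mem_sorted t (fun x => x) true b).mp hb)) hle
      · constructor
        · intro b hb
          exact ht b ((PySem.List.mem_sorted t (fun x => x) true b).mp hb)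
        · simpa using PySem.List.sorted_pairwise_rev t (fun x => x)
  rw [hsorted]
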